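-- pv_equiv track=rewrite | github.com/yoshihiro1909/e-gov-mcp | src/mcp_server.py | arabic_to_kanji
-- ===== SOURCE A (Python) =====
-- def arabic_to_kanji(num_str: str) -> str:
--     """Convert Arabic numbers to Kanji for Japanese legal text."""
--     if not num_str.isdigit():
--         return num_str
--
--     num = int(num_str)
--     if num == 0: return '〇'
--     if 1 <= num <= 9: return '一二三四五六七八九'[num-1]
--     if 10 <= num <= 19:
--         return '十' if num == 10 else '十' + '一二三四五六七八九'[num%10-1]
--     if 20 <= num <= 99:
--         tens = '二三四五六七八九'[num//10-2] + '十'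
--         ones = '' if num % 10 == 0 else '一二三四五六七八九'[num%10-1]
--         return tens + ones
--     if 100 <= num <= 999:
--         hundreds = '百' if num // 100 == 1 else '一二三四五六七八九'[num//100-1] + '百'
--         remainder = num % 100
--         if remainder == 0: return hundreds
--         if remainder < 10: return hundreds + '一二三四五六七八九'[remainder-1]
--         return hundreds + arabic_to_kanji(str(remainder))
--
--     return num_str  # Fallback for large numbers
-- ===== SOURCE B (Python) =====
-- def arabic_to_kanji(num_str: str) -> str:
--     """Convert Arabic numbers to Kanji for Japanese legal text."""
--     if not num_str.isdigit():
--         return num_str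
--     num = int(num_str)
--     if not (0 <= num <= 999):
--         return num_str
--     if num == 0:
--         return '〇'
--     parts = []
--     for divisor, unit in ((100, '百'), (10, '十'), (1, '')):
--         d = (num // divisor) % 10
--         if d == 0:
--             continue
--         if d == 1 and divisor > 1:
--             parts.append(unit)
--         else:
--             parts.append('一二三四五六七八九'[d - 1] + unit)
--     return ''.join(parts)
-- ===== Notes on version B (the rewrite author's own statement) =====
-- stated objective: simpler
-- what changed: Replaces A's range cascade (five value-range branches plus a recursive call on str(num%100)) with a single uniform place-value loop over (divisor, unit) pairs that emits each non-zero digit, omitting the leading unit digit for the tens/hundreds places.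
import Mathlib
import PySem

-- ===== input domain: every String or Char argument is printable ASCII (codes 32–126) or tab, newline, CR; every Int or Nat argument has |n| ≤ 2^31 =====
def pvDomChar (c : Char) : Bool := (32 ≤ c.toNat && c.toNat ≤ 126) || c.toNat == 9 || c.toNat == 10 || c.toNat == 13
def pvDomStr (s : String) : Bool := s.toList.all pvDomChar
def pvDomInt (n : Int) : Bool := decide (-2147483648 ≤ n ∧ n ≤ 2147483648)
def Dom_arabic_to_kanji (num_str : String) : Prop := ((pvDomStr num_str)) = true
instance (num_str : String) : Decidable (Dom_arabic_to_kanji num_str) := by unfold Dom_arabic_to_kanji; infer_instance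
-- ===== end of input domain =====

-- B replaces A's five-way value-range cascade (with a recursive call on str(num % 100))
-- by one uniform place-value loop over (divisor, unit) pairs; objective: simpler.


-- ===== PORT A =====
-- Python string indexing s[i] into the kanji digit tables, returned as a 1-char string;
-- in A every such index is in range, so the "" default is never produced.
def aIdx (s : String) (i : Int) : String :=
  match PySem.Str.pyGet? s i with
  | some c => String.ofList [c]
  | none => ""

-- A's body after num = int(num_str); the recursive call arabic_to_kanji(str(remainder))
-- is the `rec` parameter (tied below with fuel: it makes the recursion structural).
def a_body (rec : String → String) (num : Int) (num_str : String) : String :=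
  if num = 0 then "〇"
  else if 1 ≤ num ∧ num ≤ 9 then aIdx "一二三四五六七八九" (num - 1)
  else if 10 ≤ num ∧ num ≤ 19 then
    if num = 10 then "十" else "十" ++ aIdx "一二三四五六七八九" (PySem.Int.mod num 10 - 1)
  else if 20 ≤ num ∧ num ≤ 99 then
    let tens := aIdx "二三四五六七八九" (PySem.Int.floordiv num 10 - 2) ++ "十"
    let ones := if PySem.Int.mod num 10 = 0 then "" else aIdx "一二三四五六七八九" (PySem.Int.mod num 10 - 1)
    tens ++ ones
  else if 100 ≤ num ∧ num ≤ 999 then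
    let hundreds := if PySem.Int.floordiv num 100 = 1 then "百"
      else aIdx "一二三四五六七八九" (PySem.Int.floordiv num 100 - 1) ++ "百"
    let remainder := PySem.Int.mod num 100
    if remainder = 0 then hundreds
    else if remainder < 10 then hundreds ++ aIdx "一二三四五六七八九" (remainder - 1)
    else hundreds ++ rec (PySem.Int.toStr remainder)
  else num_str  -- fallback for large numbers

-- A's recursive call is on str(num % 100), a 2-digit string, so the inner call never
-- recurses again: fuel 2 is never exhausted and only makes the recursion structural.
def arabic_to_kanji_fuel : Nat → String → String
  | 0, num_str => num_str
  | fuel + 1, num_str =>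
    if ¬ PySem.Str.strIsdigit num_str then num_str
    else
      match PySem.Int.ofStr? num_str with
      | none => num_str  -- unreachable: a digit-only string always parses
      | some num => a_body (arabic_to_kanji_fuel fuel) num num_str

def arabic_to_kanji (num_str : String) : String := arabic_to_kanji_fuel 2 num_str

-- ===== PORT B =====
-- B's '一二三四五六七八九'[i], as a 1-char string (always in range where reached).
def bDigit (i : Int) : String :=
  match PySem.List.pyGet? "一二三四五六七八九".toList i with
  | some c => String.ofList [c]
  | none => ""

-- B's loop body over the place table [(100,'百'),(10,'十'),(1,'')].
def b_build (num : Int) : String :=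
  let parts := [((100 : Int), "百"), ((10 : Int), "十"), ((1 : Int), "")].foldl
    (fun acc pu =>
      let d := PySem.Int.mod (PySem.Int.floordiv num pu.1) 10
      if d = 0 then acc
      else if d = 1 ∧ 1 < pu.1 then acc ++ [pu.2]
      else acc ++ [bDigit (d - 1) ++ pu.2])
    ([] : List String)
  PySem.Str.join "" parts

def arabic_to_kanji_alt (num_str : String) : String :=
  if ¬ PySem.Str.strIsdigit num_str then num_str
  else
    match PySem.Int.ofStr? num_str with
    | none => num_str  -- unreachable: a digit-only string always parses
    | some num =>
      if ¬ (0 ≤ num ∧ num ≤ 999) then num_str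
      else if num = 0 then "〇"
      else b_build num

-- ===== PRECONDITION & SPEC =====
def Spec_arabic_to_kanji (num_str : String) (out : String) : Prop := out = arabic_to_kanji_alt num_str
instance (num_str : String) (out : String) : Decidable (Spec_arabic_to_kanji num_str out) := by unfold Spec_arabic_to_kanji; infer_instance

-- ===== CLAIM (what is proved, stated in full; the proofs are below) =====
def Claim_equal_arabic_to_kanji : Prop := ∀ (num_str : String), Dom_arabic_to_kanji num_str → Spec_arabic_to_kanji num_str (arabic_to_kanji num_str)

-- ===== LEMMAS AND PROOFS =====

-- For 0 ≤ num ≤ 999 A's post-parse body never reaches its fallback, so it ignores num_str.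
theorem a_body_irrel (num : Int) (h0 : 0 ≤ num) (h9 : num ≤ 999) (s t : String) :
    a_body (arabic_to_kanji_fuel 1) num s = a_body (arabic_to_kanji_fuel 1) num t := by
  unfold a_body
  split_ifs <;> first | rfl | omega

-- Out of range, A's body is the fallback.
theorem a_body_out (num : Int) (h : num < 0 ∨ 999 < num) (s : String) :
    a_body (arabic_to_kanji_fuel 1) num s = s := by
  unfold a_body
  split_ifs <;> first | rfl | omega

-- The finite value table: A's body and B's builder agree on every value 0..999.
set_option maxRecDepth 100000 in
set_option maxHeartbeats 4000000 in
theorem table : ∀ m : Fin 1000,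
    a_body (arabic_to_kanji_fuel 1) ((m.val : Nat) : Int) "" =
      (if ((m.val : Nat) : Int) = 0 then "〇" else b_build ((m.val : Nat) : Int)) := by
  decide

theorem core_in (num : Int) (h0 : 0 ≤ num) (h9 : num ≤ 999) (s : String) :
    a_body (arabic_to_kanji_fuel 1) num s = (if num = 0 then "〇" else b_build num) := by
  have hlt : num.toNat < 1000 := by omega
  have hnum : num = ((num.toNat : Nat) : Int) := by omega
  rw [a_body_irrel num h0 h9 s ""]
  rw [hnum]
  exact table ⟨num.toNat, hlt⟩

-- ===== VERDICT (by name: the statement is the Claim_ definition above) =====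
theorem arabic_to_kanji_spec : Claim_equal_arabic_to_kanji := by
  intro num_str _
  unfold Spec_arabic_to_kanji arabic_to_kanji arabic_to_kanji_alt arabic_to_kanji_fuel
  by_cases hd : PySem.Str.strIsdigit num_str
  · simp only [hd, not_true_eq_false, if_false]
    cases hp : PySem.Int.ofStr? num_str with
    | none => rfl
    | some num =>
      dsimp only
      by_cases hr : 0 ≤ num ∧ num ≤ 999
      · rw [core_in num hr.1 hr.2 num_str]
        simp [hr]
      · rw [a_body_out num (by omega) num_str]
        simp [hr]
  · rw [Bool.not_eq_true] at hd
    have hd' : PySem.Chars.strIsdigit num_str.toList = false := by simpa using hd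
    simp [hd']
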